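-- pv_equiv track=rewrite | github.com/sein-tao/cactus | src/cactus/shared/common.py | runCactusSplitFlowersBySecondaryGrouping
-- ===== SOURCE A (Python) =====
-- def encodeFlowerNames(flowerNames):
--     if len(flowerNames) == 0:
--         return "0"
--     return "%i %s" % (len(flowerNames), " ".join([ str(flowerNames[0]) ] + [ str(flowerNames[i] - flowerNames[i-1]) for i in range(1, len(flowerNames)) ]))
--
-- def runCactusSplitFlowersBySecondaryGrouping(flowerNames):
--     """Splits a list of flowers into smaller lists.
--     """
--     flowerNames = flowerNames.split()
--     flowerGroups = []
--     stack = []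
--     overlarge = False
--     name = 0
--     for i in flowerNames[1:]:
--         if i != '':
--             if i in ('a', 'b'):
--                 if len(stack) > 0:
--                     flowerGroups.append((overlarge, encodeFlowerNames(stack))) #b indicates the stack is overlarge
--                     stack = []
--                 overlarge = i == 'b'
--             else:
--                 name = int(i) + name
--                 stack.append(name)
--     if len(stack) > 0:
--         flowerGroups.append((overlarge, encodeFlowerNames(stack)))
--     return flowerGroups
-- ===== SOURCE B (Python) =====
-- def runCactusSplitFlowersBySecondaryGrouping(flowerNames):
--     """Splits a list of flowers into smaller lists.
--     """
--     tokens = [t for t in flowerNames.split()[1:] if t != '']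
--     # pass 1: partition the numeric tokens (kept as raw deltas) into segments
--     # delimited by 'a'/'b' markers, tagging each segment with its overlarge flag
--     segments = []
--     cur = []
--     overlarge = False
--     for t in tokens:
--         if t in ('a', 'b'):
--             if cur:
--                 segments.append((overlarge, cur))
--                 cur = []
--             overlarge = t == 'b'
--         else:
--             cur.append(int(t))
--     if cur:
--         segments.append((overlarge, cur))
--     # pass 2: thread one global running total through all segments; within a
--     # segment the deltas after the first element are the raw tokens themselves,
--     # so the encoded string is emitted directly without rebuilding absolute names
--     out = []
--     total = 0
--     for ov, vals in segments:
--         first = total + vals[0]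
--         rest = vals[1:]
--         total = first + sum(rest)
--         out.append((ov, "%i %s" % (1 + len(rest), " ".join([str(first)] + [str(v) for v in rest]))))
--     return out
-- ===== Notes on version B (the rewrite author's own statement) =====
-- stated objective: alternative
-- what changed: B replaces A's single loop over a stack of absolute cumulative names (re-delta-encoded by encodeFlowerNames at each flush) with two passes: first partition the raw integer tokens into marker-delimited segments, then thread one global running total through the segments and emit each encoded string directly, since within a segment the deltas after the first element are the raw tokens themselves.
import Mathlib
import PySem

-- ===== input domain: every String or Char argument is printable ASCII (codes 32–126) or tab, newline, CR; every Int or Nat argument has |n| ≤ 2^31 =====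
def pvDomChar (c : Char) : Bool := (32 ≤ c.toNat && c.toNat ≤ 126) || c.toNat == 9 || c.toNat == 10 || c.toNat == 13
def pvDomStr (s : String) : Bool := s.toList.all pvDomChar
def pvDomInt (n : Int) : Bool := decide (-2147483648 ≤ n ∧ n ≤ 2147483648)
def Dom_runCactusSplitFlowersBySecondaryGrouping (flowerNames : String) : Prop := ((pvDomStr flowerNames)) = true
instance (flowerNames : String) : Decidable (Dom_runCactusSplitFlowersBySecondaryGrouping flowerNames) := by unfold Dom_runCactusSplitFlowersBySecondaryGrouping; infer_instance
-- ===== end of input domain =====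

-- B re-decomposes A's single cumulative-stack loop into two passes (segment the raw
-- delta tokens, then thread one global total and emit each encoded string directly);
-- objective: alternative (same O(n) cost, different algorithmic decomposition).

-- ===== PORT A =====
-- "%i %s" % (n, s)
def pyFmtIntStr (n : Int) (s : String) : String := PySem.Str.join " " [PySem.Int.toStr n, s]

def encodeFlowerNames (l : List Int) : String :=
  if l.length = 0 then "0"
  else pyFmtIntStr (l.length : Int)
    (PySem.Str.join " " (PySem.Int.toStr (PySem.List.pyGetD l 0 0) ::
      (PySem.List.pyRange 1 (l.length : Int) 1).map (fun i =>
        PySem.Int.toStr (PySem.List.pyGetD l i 0 - PySem.List.pyGetD l (i-1) 0))))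

-- one iteration of A's loop; int(i) ported as (ofStr? i).getD 0, exact under Pre_
def aStep (st : List (Bool × String) × List Int × Bool × Int) (i : String) :
    List (Bool × String) × List Int × Bool × Int :=
  let (gs, stack, ov, name) := st
  if i ≠ "" then
    if i = "a" ∨ i = "b" then
      (if stack.length > 0 then gs ++ [(ov, encodeFlowerNames stack)] else gs,
       if stack.length > 0 then ([] : List Int) else stack,
       i == "b", name)
    else
      let name' := (PySem.Int.ofStr? i).getD 0 + name
      (gs, stack ++ [name'], ov, name')
  else st

def runCactusSplitFlowersBySecondaryGrouping (flowerNames : String) : List (Bool × String) :=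
  let toks := PySem.Str.split₀ flowerNames
  let st := (PySem.List.slice toks (some 1) none).foldl aStep ([], [], false, 0)
  if st.2.1.length > 0 then st.1 ++ [(st.2.2.1, encodeFlowerNames st.2.1)] else st.1

-- ===== PORT B =====
-- pass 1: partition raw integer tokens into marker-delimited segments
def bStep1 (st : List (Bool × List Int) × List Int × Bool) (t : String) :
    List (Bool × List Int) × List Int × Bool :=
  let (segs, cur, ov) := st
  if t = "a" ∨ t = "b" then
    (if cur ≠ [] then segs ++ [(ov, cur)] else segs,
     if cur ≠ [] then ([] : List Int) else cur,
     t == "b")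
  else
    (segs, cur ++ [(PySem.Int.ofStr? t).getD 0], ov)

-- pass 2: thread the global running total and emit each encoded string directly
def bStep2 (st : List (Bool × String) × Int) (seg : Bool × List Int) :
    List (Bool × String) × Int :=
  let (out, total) := st
  let (ov, vals) := seg
  let first := total + PySem.List.pyGetD vals 0 0
  let rest := PySem.List.slice vals (some 1) none
  (out ++ [(ov, pyFmtIntStr (1 + (rest.length : Int))
      (PySem.Str.join " " (PySem.Int.toStr first :: rest.map PySem.Int.toStr)))],
   first + rest.sum)

def runCactusSplitFlowersBySecondaryGrouping_alt (flowerNames : String) : List (Bool × String) :=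
  let tokens := (PySem.List.slice (PySem.Str.split₀ flowerNames) (some 1) none).filter (fun t => t ≠ "")
  let st := tokens.foldl bStep1 ([], [], false)
  let segs := if st.2.1 ≠ [] then st.1 ++ [(st.2.2, st.2.1)] else st.1
  (segs.foldl bStep2 ([], 0)).1

-- ===== PRECONDITION & SPEC =====
-- Pre_ excludes exactly the inputs on which Python A raises ValueError: a token after
-- the first that is neither 'a' nor 'b' nor an int() literal makes int(i) raise.
def Pre_runCactusSplitFlowersBySecondaryGrouping (flowerNames : String) : Prop :=
  ∀ t ∈ (PySem.Str.split₀ flowerNames).drop 1,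
    t = "a" ∨ t = "b" ∨ (PySem.Int.ofStr? t).isSome = true
instance (flowerNames : String) : Decidable (Pre_runCactusSplitFlowersBySecondaryGrouping flowerNames) := by unfold Pre_runCactusSplitFlowersBySecondaryGrouping; infer_instance

def pvWitness_runCactusSplitFlowersBySecondaryGrouping : String := "x 1 a 2 3 b 4"

def Spec_runCactusSplitFlowersBySecondaryGrouping (flowerNames : String) (out : List (Bool × String)) : Prop := out = runCactusSplitFlowersBySecondaryGrouping_alt flowerNames
instance (flowerNames : String) (out : List (Bool × String)) : Decidable (Spec_runCactusSplitFlowersBySecondaryGrouping flowerNames out) := by unfold Spec_runCactusSplitFlowersBySecondaryGrouping; infer_instance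

-- ===== CLAIM (what is proved, stated in full; the proofs are below) =====
def Claim_equal_runCactusSplitFlowersBySecondaryGrouping : Prop := ∀ (flowerNames : String), Dom_runCactusSplitFlowersBySecondaryGrouping flowerNames → Pre_runCactusSplitFlowersBySecondaryGrouping flowerNames → Spec_runCactusSplitFlowersBySecondaryGrouping flowerNames (runCactusSplitFlowersBySecondaryGrouping flowerNames)

-- ===== LEMMAS AND PROOFS =====

-- the absolute names A keeps on its stack: cumulative sums of the raw deltas from base p
def absFrom (p : Int) : List Int → List Int
  | [] => []
  | v :: vs => (p + v) :: absFrom (p + v) vs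

theorem absFrom_nil (p : Int) : absFrom p [] = [] := rfl

theorem length_absFrom (vs : List Int) : ∀ p, (absFrom p vs).length = vs.length := by
  induction vs with
  | nil => intro p; rfl
  | cons v vs ih => intro p; simp [absFrom, ih]

theorem absFrom_append_singleton (vs : List Int) : ∀ p x,
    absFrom p (vs ++ [x]) = absFrom p vs ++ [p + vs.sum + x] := by
  induction vs with
  | nil => intro p x; simp [absFrom]
  | cons v vs ih =>
      intro p x
      simp only [List.cons_append, absFrom, ih, List.sum_cons]
      ring_nf

theorem deltas_absFrom (vs : List Int) : ∀ p v,
    (List.range vs.length).map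
      (fun k => (absFrom p (v :: vs)).getD (k+1) 0 - (absFrom p (v :: vs)).getD k 0) = vs := by
  induction vs with
  | nil => intro p v; simp
  | cons x vs ih =>
      intro p v
      have h := ih (p + v) x
      simp only [List.length_cons, List.range_succ_eq_map, List.map_cons, List.map_map,
        List.cons.injEq]
      refine ⟨by simp [absFrom], ?_⟩
      calc (List.range vs.length).map
              ((fun k => (absFrom p (v :: x :: vs)).getD (k+1) 0 - (absFrom p (v :: x :: vs)).getD k 0) ∘ Nat.succ)
            = (List.range vs.length).map
              (fun k => (absFrom (p+v) (x :: vs)).getD (k+1) 0 - (absFrom (p+v) (x :: vs)).getD k 0) := by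
              apply List.map_congr_left; intro k _
              simp [absFrom, Function.comp]
          _ = vs := h

theorem encode_absFrom (p v : Int) (vs : List Int) :
    encodeFlowerNames (absFrom p (v :: vs)) =
      pyFmtIntStr (1 + (vs.length : Int))
        (PySem.Str.join " " (PySem.Int.toStr (p + v) :: vs.map PySem.Int.toStr)) := by
  have hlen : (absFrom p (v :: vs)).length = vs.length + 1 := by
    simpa using length_absFrom (v :: vs) p
  unfold encodeFlowerNames
  rw [hlen]
  simp only [Nat.succ_ne_zero, reduceIte]
  have hrange : PySem.List.pyRange 1 ((vs.length + 1 : Nat) : Int) 1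
      = (List.range vs.length).map (fun k => ((k + 1 : Nat) : Int)) := by
    rw [PySem.List.pyRange_one]
    have h0 : ((vs.length + 1 : Nat) : Int) - 1 = (vs.length : Int) := by push_cast; ring
    rw [h0, Int.toNat_natCast]
    apply List.map_congr_left; intro k _; push_cast; ring
  rw [hrange, List.map_map]
  have hfun : ((fun i => PySem.Int.toStr (PySem.List.pyGetD (absFrom p (v :: vs)) i 0
                 - PySem.List.pyGetD (absFrom p (v :: vs)) (i-1) 0)) ∘ (fun k : Nat => ((k + 1 : Nat) : Int)))
      = fun k : Nat => PySem.Int.toStr ((absFrom p (v :: vs)).getD (k+1) 0 - (absFrom p (v :: vs)).getD k 0) := by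
    funext k
    simp only [Function.comp_apply]
    have e1 : ((k + 1 : Nat) : Int) - 1 = ((k : Nat) : Int) := by push_cast; ring
    simp only [e1, PySem.List.pyGetD_natCast,
      List.getD_eq_getElem?_getD]
  rw [hfun]
  have hd := deltas_absFrom vs p v
  have hmap : (List.range vs.length).map
      (fun k => PySem.Int.toStr ((absFrom p (v :: vs)).getD (k+1) 0 - (absFrom p (v :: vs)).getD k 0))
      = vs.map PySem.Int.toStr := by
    conv_rhs => rw [← hd, List.map_map]
    rfl
  rw [hmap]
  have hget : PySem.List.pyGetD (absFrom p (v :: vs)) 0 0 = p + v := by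
    simp [absFrom, PySem.List.pyGetD_zero_cons]
  rw [hget]
  congr 1
  push_cast; ring

-- pulling an accumulated prefix out of the pass-2 fold
theorem bStep2_out_append (segs : List (Bool × List Int)) : ∀ (out : List (Bool × String)) (t : Int),
    segs.foldl bStep2 (out, t)
      = (out ++ (segs.foldl bStep2 ([], t)).1, (segs.foldl bStep2 ([], t)).2) := by
  induction segs with
  | nil => intro out t; simp
  | cons s segs ih =>
      intro out t
      obtain ⟨ov, vals⟩ := s
      simp only [List.foldl_cons, bStep2, List.nil_append]
      conv_rhs => rw [ih]
      rw [ih]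
      simp [List.append_assoc]

-- pulling an accumulated segment prefix out of the pass-1 fold
theorem bStep1_shift (segs : List (Bool × List Int)) (cur : List Int) (ov : Bool) (t : String) :
    bStep1 (segs, cur, ov) t
      = (segs ++ (bStep1 ([], cur, ov) t).1, (bStep1 ([], cur, ov) t).2) := by
  simp only [bStep1]
  split_ifs <;> simp

theorem bStep1_segs_append (toks : List String) : ∀ (segs : List (Bool × List Int)) (cur : List Int) (ov : Bool),
    toks.foldl bStep1 (segs, cur, ov)
      = (segs ++ (toks.foldl bStep1 ([], cur, ov)).1,
         (toks.foldl bStep1 ([], cur, ov)).2) := by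
  induction toks with
  | nil => intro segs cur ov; simp
  | cons t toks ih =>
      intro segs cur ov
      rcases h : bStep1 ([], cur, ov) t with ⟨S0, C0, O0⟩
      rw [List.foldl_cons, List.foldl_cons, bStep1_shift, h]
      dsimp only
      conv_rhs => rw [ih]
      rw [ih]
      simp [List.append_assoc]

-- A's finalized loop state vs B's two passes, generalized over the shared state
theorem main_inv (toks : List String) : ∀ (gs : List (Bool × String)) (cur : List Int) (ov : Bool) (base : Int),
    (let st := toks.foldl aStep (gs, absFrom base cur, ov, base + cur.sum)
     if st.2.1.length > 0 then st.1 ++ [(st.2.2.1, encodeFlowerNames st.2.1)] else st.1)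
    = gs ++
      (let st := (toks.filter (fun t => t ≠ "")).foldl bStep1 ([], cur, ov)
       let segs := if st.2.1 ≠ [] then st.1 ++ [(st.2.2, st.2.1)] else st.1
       (segs.foldl bStep2 ([], base)).1) := by
  induction toks with
  | nil =>
      intro gs cur ov base
      match cur with
      | [] => simp [absFrom]
      | c :: cs =>
          simp only [List.foldl_nil, List.filter_nil]
          have hne : (absFrom base (c :: cs)).length > 0 := by
            rw [length_absFrom]; simp
          simp only [hne, if_pos, ne_eq, reduceCtorEq, not_false_eq_true, List.nil_append]
          rw [List.foldl_cons, List.foldl_nil, bStep2]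
          simp only [PySem.List.pyGetD_zero_cons, PySem.List.slice_from_one, List.tail_cons]
          rw [encode_absFrom]
          simp
  | cons t toks ih =>
      intro gs cur ov base
      by_cases ht : t = ""
      · subst ht
        simp only [List.foldl_cons, List.filter_cons]
        rw [aStep]
        simp only [ne_eq, not_true_eq_false, ite_false]
        exact ih gs cur ov base
      · simp only [List.foldl_cons, List.filter_cons, ht, ne_eq, not_false_eq_true, decide_true,
          if_pos]
        by_cases hab : t = "a" ∨ t = "b"
        · rw [aStep, bStep1]
          simp only [ne_eq, ht, not_false_eq_true, if_pos, hab]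
          match cur with
          | [] =>
              simp only [absFrom, List.length_nil, gt_iff_lt, lt_irrefl, ite_false,
                not_true_eq_false]
              have := ih gs [] (t == "b") base
              simp only [absFrom, List.sum_nil, add_zero] at this ⊢
              exact this
          | c :: cs =>
              have hlen : (absFrom base (c :: cs)).length > 0 := by
                rw [length_absFrom]; simp
              simp only [hlen, if_pos, reduceCtorEq, not_false_eq_true,
                List.nil_append]
              have := ih (gs ++ [(ov, encodeFlowerNames (absFrom base (c :: cs)))]) []
                        (t == "b") (base + (c :: cs).sum)
              simp only [absFrom_nil, List.sum_nil, add_zero] at this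
              rw [this]
              rw [bStep1_segs_append _ [(ov, c :: cs)] [] (t == "b")]
              dsimp only
              split_ifs with hC
              · simp only [List.cons_append]
                rw [List.foldl_cons, bStep2]
                simp only [PySem.List.pyGetD_zero_cons, PySem.List.slice_from_one,
                  List.tail_cons, List.nil_append]
                conv_rhs => rw [bStep2_out_append]
                rw [encode_absFrom]
                have harr : base + c + cs.sum = base + (c + cs.sum) := by ring
                simp [harr]
              · simp only [List.cons_append]
                rw [List.foldl_cons, bStep2]
                simp only [PySem.List.pyGetD_zero_cons, PySem.List.slice_from_one,
                  List.tail_cons, List.nil_append]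
                conv_rhs => rw [bStep2_out_append]
                rw [encode_absFrom]
                have harr : base + c + cs.sum = base + (c + cs.sum) := by ring
                simp [harr]
        · rw [aStep, bStep1]
          simp only [ne_eq, ht, not_false_eq_true, if_pos, hab, if_neg]
          have hx : (PySem.Int.ofStr? t).getD 0 + (base + cur.sum)
              = base + (cur ++ [(PySem.Int.ofStr? t).getD 0]).sum := by
            simp; ring
          have hstack : absFrom base cur ++ [base + (cur ++ [(PySem.Int.ofStr? t).getD 0]).sum]
              = absFrom base (cur ++ [(PySem.Int.ofStr? t).getD 0]) := by
            rw [absFrom_append_singleton]; simp [List.sum_append, add_assoc]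
          rw [hx, hstack]
          exact ih gs (cur ++ [(PySem.Int.ofStr? t).getD 0]) ov base

-- ===== VERDICT (by name: the statement is the Claim_ definition above) =====
theorem runCactusSplitFlowersBySecondaryGrouping_spec : Claim_equal_runCactusSplitFlowersBySecondaryGrouping := by
  intro s _ _
  unfold Spec_runCactusSplitFlowersBySecondaryGrouping
  unfold runCactusSplitFlowersBySecondaryGrouping runCactusSplitFlowersBySecondaryGrouping_alt
  have := main_inv (PySem.List.slice (PySem.Str.split₀ s) (some 1) none) [] [] false 0
  simp only [absFrom, List.sum_nil, add_zero, List.nil_append] at this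
  simpa using this
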